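-- pv_equiv track=rewrite | github.com/VanJackal/AoC2021 | Day3/Part1.py | getGammaRate
-- ===== SOURCE A (Python) =====
-- def getGammaRate(data):
--     result = ""
--     for i in range(len(data[0])):
--         vals = [int(j[i]) for j in data]
--         total = sum(vals)
--         if total > len(data)/2:
--             result += "1"
--         else:
--             result += "0"
--
--     return result
-- ===== SOURCE B (Python) =====
-- def getGammaRate(data):
--     n = len(data)
--     counts = [0] * len(data[0])
--     for row in data:
--         counts = [c + int(ch) for c, ch in zip(counts, row)]
--     return "".join('1' if 2 * c > n else '0' for c in counts)
-- ===== Notes on version B (the rewrite author's own statement) =====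
-- stated objective: faster
-- what changed: B makes a single row-major pass maintaining a per-column counts vector instead of rescanning every column of every row (A builds a fresh per-column list and sums it for each bit position), then renders the result string from the counts; the comparison is the integer 2*c > n instead of float c > n/2.
import Mathlib
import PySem

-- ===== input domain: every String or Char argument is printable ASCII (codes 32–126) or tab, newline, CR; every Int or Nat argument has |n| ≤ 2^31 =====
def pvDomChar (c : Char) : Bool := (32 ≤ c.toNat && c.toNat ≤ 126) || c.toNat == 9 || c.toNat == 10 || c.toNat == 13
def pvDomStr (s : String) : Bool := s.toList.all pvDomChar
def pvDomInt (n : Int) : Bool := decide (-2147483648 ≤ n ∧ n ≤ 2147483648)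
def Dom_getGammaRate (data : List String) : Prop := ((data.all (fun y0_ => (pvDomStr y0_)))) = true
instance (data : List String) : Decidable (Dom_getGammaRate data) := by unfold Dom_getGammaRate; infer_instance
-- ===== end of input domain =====

-- B replaces A's per-column rescans by one row-major pass over a counts vector (constant-factor change; return value only).

-- ===== PORT A =====
-- result is accumulated as List Char (Python's str concatenation); 'total > len(data)/2'
-- over Python's exact float division is the integer comparison '2 * total > len(data)'.
def getGammaRate (data : List String) : String :=
  let w : Int := PySem.Str.len (PySem.List.pyGetD data 0 "")   -- len(data[0]); [] excluded by Pre_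
  String.mk ((PySem.List.pyRange 0 w 1).foldl (fun result i =>
    let vals := data.map (fun j => (PySem.Int.ofChars? [PySem.List.pyGetD j.toList i ' ']).getD 0)
    let total := vals.sum
    if 2 * total > (data.length : Int) then result ++ ['1'] else result ++ ['0']) [])

-- ===== PORT B =====
def getGammaRate_alt (data : List String) : String :=
  let n : Int := data.length
  let counts0 : List Int := List.replicate (PySem.Str.len (PySem.List.pyGetD data 0 "")).toNat 0
  let counts := data.foldl (fun counts row =>
    (counts.zip row.toList).map (fun p => p.1 + (PySem.Int.ofChars? [p.2]).getD 0)) counts0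
  String.mk (counts.map (fun c => if 2 * c > n then '1' else '0'))

-- ===== PRECONDITION & SPEC =====
-- Exactly where Python A returns: data nonempty (else IndexError on data[0]), every row at
-- least as long as data[0] (else IndexError on j[i]), and every inspected char an ASCII
-- digit (else ValueError on int(j[i])).
def Pre_getGammaRate (data : List String) : Prop :=
  data ≠ [] ∧ ∀ s ∈ data,
    (data.headD "").toList.length ≤ s.toList.length ∧
    ((s.toList.take (data.headD "").toList.length).all (fun c => c.isDigit)) = true
instance (data : List String) : Decidable (Pre_getGammaRate data) := by unfold Pre_getGammaRate; infer_instance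
def pvWitness_getGammaRate : List String := ["01", "11", "10"]

def Spec_getGammaRate (data : List String) (out : String) : Prop := out = getGammaRate_alt data
instance (data : List String) (out : String) : Decidable (Spec_getGammaRate data out) := by unfold Spec_getGammaRate; infer_instance

-- ===== CLAIM (what is proved, stated in full; the proofs are below) =====
def Claim_equal_getGammaRate : Prop := ∀ (data : List String), Dom_getGammaRate data → Pre_getGammaRate data → Spec_getGammaRate data (getGammaRate data)

-- ===== LEMMAS AND PROOFS =====

-- int(ch) for a single char, defaulted (total under Pre_)
def pvD (c : Char) : Int := (PySem.Int.ofChars? [c]).getD 0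

-- B's fold over the rows, characterised per column.
theorem pvCountsSpec (rows : List String) (cs : List Int)
    (h : ∀ s ∈ rows, cs.length ≤ s.toList.length) :
    rows.foldl (fun counts row =>
        (counts.zip row.toList).map (fun p => p.1 + (PySem.Int.ofChars? [p.2]).getD 0)) cs
      = (List.range cs.length).map
          (fun k => cs.getD k 0 + (rows.map (fun j => pvD (j.toList.getD k ' '))).sum) := by
  induction rows generalizing cs with
  | nil =>
    simp only [List.foldl_nil, List.map_nil, List.sum_nil, add_zero]
    apply List.ext_getElem
    · simp
    · intro k h1 h2
      simp [List.getD_eq_getElem?_getD, h1]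
  | cons r rest ih =>
    simp only [List.foldl_cons]
    have hr : cs.length ≤ r.toList.length := h r (by simp)
    have hr' : cs.length ≤ r.length := by simpa using hr
    have hlen : ((cs.zip r.toList).map (fun p => p.1 + (PySem.Int.ofChars? [p.2]).getD 0)).length
        = cs.length := by
      simp [List.length_zip]
      exact hr'
    rw [ih _ (by intro s hs; rw [hlen]; exact (h s (by simp [hs])))]
    rw [hlen]
    apply List.map_congr_left
    intro k hk
    have hk' : k < cs.length := List.mem_range.mp hk
    have hk2 : k < r.toList.length := lt_of_lt_of_le hk' hr
    have hkz : k < (cs.zip r.toList).length := by simp [List.length_zip]; omega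
    have hz : (cs.zip r.toList)[k]? = some (cs[k], r.toList[k]) := by
      rw [List.getElem?_eq_getElem hkz]
      simp [List.getElem_zip]
    have hget : ((cs.zip r.toList).map (fun p => p.1 + (PySem.Int.ofChars? [p.2]).getD 0)).getD k 0
        = cs.getD k 0 + pvD (r.toList.getD k ' ') := by
      simp only [List.getD_eq_getElem?_getD, List.getElem?_map, hz,
        List.getElem?_eq_getElem hk', List.getElem?_eq_getElem hk2, pvD]
      simp
    rw [hget]
    simp [add_assoc]

-- A's fold over the bit positions, as a map over List.range.
theorem pvA_chars (data : List String) (hne : data ≠ []) :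
    getGammaRate data = String.mk ((List.range (data.headD "").toList.length).map
      (fun k => if 2 * (data.map (fun j => pvD (j.toList.getD k ' '))).sum > (data.length : Int)
                then '1' else '0')) := by
  obtain ⟨s, rest, rfl⟩ := List.exists_cons_of_ne_nil hne
  unfold getGammaRate
  simp only [PySem.List.pyGetD_zero_cons, PySem.Str.len_eq, List.headD_cons]
  have key : ∀ (init : List Char) (l : List Int),
      l.foldl (fun result i =>
        if 2 * ((s :: rest).map (fun j => (PySem.Int.ofChars? [PySem.List.pyGetD j.toList i ' ']).getD 0)).sum > ((s :: rest).length : Int)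
        then result ++ ['1'] else result ++ ['0']) init
      = init ++ l.map (fun i =>
          if 2 * ((s :: rest).map (fun j => (PySem.Int.ofChars? [PySem.List.pyGetD j.toList i ' ']).getD 0)).sum > ((s :: rest).length : Int)
          then '1' else '0') := by
    intro init l
    induction l generalizing init with
    | nil => simp
    | cons a t iht =>
      rw [List.foldl_cons, iht]
      split
      · rename_i hc; simp at hc; simp [hc]
      · rename_i hc; simp at hc; simp [hc]
  rw [key, PySem.List.pyRange_zero_natCast, List.map_map]
  congr 1
  apply List.map_congr_left
  intro k hk
  simp [pvD, PySem.List.pyGetD_natCast]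

-- ===== VERDICT (by name: the statement is the Claim_ definition above) =====
theorem getGammaRate_spec : Claim_equal_getGammaRate := by
  intro data _ hpre
  obtain ⟨hne, hrows⟩ := hpre
  unfold Spec_getGammaRate
  rw [pvA_chars data hne]
  unfold getGammaRate_alt
  obtain ⟨s, rest, rfl⟩ := List.exists_cons_of_ne_nil hne
  simp only [PySem.List.pyGetD_zero_cons, PySem.Str.len_eq, List.headD_cons] at *
  rw [show ((s.toList.length : Int)).toNat = s.toList.length by simp]
  rw [pvCountsSpec _ _ (by
    intro t ht
    simpa using (hrows t ht).1)]
  simp [List.map_map, Function.comp_def, pvD]
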